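-- pv_equiv track=rewrite | github.com/h4ckyou/write-ups | Practice/Challenges/Rev/Breakme/solve.py | bang
-- ===== SOURCE A (Python) =====
-- import string
--
-- def bang(data, shift):
--     rev = ''
--
--     for char in data:
--         if char not in string.ascii_letters:
--             rev += char
--         else:
--             if char in string.ascii_lowercase:
--                 start = ord('a')
--             else:
--                 start = ord('A')
--
--             rev += chr(((ord(char) - start - shift) % 26) + start)
--
--     return rev[1::].swapcase() + rev[0]
-- ===== SOURCE B (Python) =====
-- def bang(data, shift):
--     # Fused single pass: decode-and-swapcase each char of data[1:] directly,
--     # then append the decoded (case-kept) first char; no intermediate rev,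
--     # no swapcase pass, no membership tests against alphabet strings.
--     out = []
--     for c in data[1:]:
--         o = ord(c)
--         if 97 <= o <= 122:
--             out.append(chr((o - 97 - shift) % 26 + 65))
--         elif 65 <= o <= 90:
--             out.append(chr((o - 65 - shift) % 26 + 97))
--         else:
--             out.append(c)
--     o = ord(data[0])
--     if 97 <= o <= 122:
--         last = chr((o - 97 - shift) % 26 + 97)
--     elif 65 <= o <= 90:
--         last = chr((o - 65 - shift) % 26 + 65)
--     else:
--         last = data[0]
--     return ''.join(out) + last
-- ===== Notes on version B (the rewrite author's own statement) =====
-- stated objective: faster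
-- what changed: B fuses A's three stages (per-char Caesar loop building rev via string +=, then a swapcase pass over rev[1:], then the rotate concat) into one arithmetic pass: each char of data[1:] is decoded and case-flipped in a single step (lowercase maps straight to the shifted uppercase letter and vice versa) and the decoded case-kept first char is appended last; no intermediate string, no alphabet membership tests, no swapcase call.
import Mathlib
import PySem

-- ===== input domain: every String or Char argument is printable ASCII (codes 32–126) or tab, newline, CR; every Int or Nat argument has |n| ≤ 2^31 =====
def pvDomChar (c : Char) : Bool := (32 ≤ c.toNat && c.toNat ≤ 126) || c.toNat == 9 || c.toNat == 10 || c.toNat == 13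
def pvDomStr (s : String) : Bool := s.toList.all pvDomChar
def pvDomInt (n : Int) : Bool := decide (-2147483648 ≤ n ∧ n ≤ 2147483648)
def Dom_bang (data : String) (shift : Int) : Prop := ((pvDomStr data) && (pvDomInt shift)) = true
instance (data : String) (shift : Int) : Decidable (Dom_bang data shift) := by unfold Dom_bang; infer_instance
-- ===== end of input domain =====

-- B fuses A's three stages (Caesar loop building rev, swapcase over rev[1:], rotate) into one pass
-- that decodes-and-case-flips each char of data[1:] directly and appends the decoded first char; objective: faster (constant factor, measured).

-- ===== PORT A =====
def bangShift (start : Int) (shift : Int) (c : Char) : Char :=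
  Char.ofNat ((PySem.Int.mod ((c.toNat : Int) - start - shift) 26 + start).toNat)

def asciiLower : List Char := "abcdefghijklmnopqrstuvwxyz".toList
def asciiUpper : List Char := "ABCDEFGHIJKLMNOPQRSTUVWXYZ".toList
def asciiLetters : List Char := asciiLower ++ asciiUpper   -- string.ascii_letters

-- Python's str.swapcase on one char (exact on Dom's ASCII characters)
def swapChar (c : Char) : Char :=
  if PySem.Chars.islower c then PySem.Chars.upperChar c
  else if PySem.Chars.isupper c then PySem.Chars.lowerChar c
  else c

def bang (data : String) (shift : Int) : String :=
  let rev : List Char := data.toList.foldl (fun rev char =>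
    if char ∉ asciiLetters then rev ++ [char]
    else
      let start : Int := if char ∈ asciiLower then 97 else 65
      rev ++ [bangShift start shift char]) []
  -- return rev[1::].swapcase() + rev[0]  (rev[0] raises IndexError on empty data; excluded by Pre_)
  match PySem.List.pyGet? rev 0 with
  | some c0 => String.ofList ((PySem.List.slice rev (some 1) none).map swapChar ++ [c0])
  | none => ""

-- ===== PORT B =====
-- decode-and-swapcase in one arithmetic step (the body of B's for-loop over data[1:])
def bangDecSwap (shift : Int) (c : Char) : Char :=
  let o : Int := (c.toNat : Int)
  if 97 ≤ o ∧ o ≤ 122 then Char.ofNat ((PySem.Int.mod (o - 97 - shift) 26 + 65).toNat)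
  else if 65 ≤ o ∧ o ≤ 90 then Char.ofNat ((PySem.Int.mod (o - 65 - shift) 26 + 97).toNat)
  else c

-- decode keeping the case (B's handling of data[0])
def bangDecLast (shift : Int) (c : Char) : Char :=
  let o : Int := (c.toNat : Int)
  if 97 ≤ o ∧ o ≤ 122 then Char.ofNat ((PySem.Int.mod (o - 97 - shift) 26 + 97).toNat)
  else if 65 ≤ o ∧ o ≤ 90 then Char.ofNat ((PySem.Int.mod (o - 65 - shift) 26 + 65).toNat)
  else c

def bang_alt (data : String) (shift : Int) : String :=
  match data.toList with
  | [] => ""   -- data[0] raises IndexError on empty data; excluded by Pre_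
  | c0 :: rest =>   -- the loop over data[1:], then the decoded data[0] appended
      String.ofList (rest.map (bangDecSwap shift) ++ [bangDecLast shift c0])

-- ===== PRECONDITION & SPEC =====
-- Pre_ excludes only the empty string, on which both A and B raise IndexError at rev[0]/data[0].
def Pre_bang (data : String) (shift : Int) : Prop := data ≠ ""
instance (data : String) (shift : Int) : Decidable (Pre_bang data shift) := by unfold Pre_bang; infer_instance
def pvWitness_bang : String × Int := ("Ab z!", 3)

def Spec_bang (data : String) (shift : Int) (out : String) : Prop := out = bang_alt data shift
instance (data : String) (shift : Int) (out : String) : Decidable (Spec_bang data shift out) := by unfold Spec_bang; infer_instance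

-- ===== CLAIM =====
def Claim_equal_bang : Prop := ∀ (data : String) (shift : Int), Dom_bang data shift → Pre_bang data shift → Spec_bang data shift (bang data shift)

-- ===== LEMMAS AND PROOFS =====

-- A's per-char result as a function
def gA (shift : Int) (c : Char) : Char :=
  if c ∉ asciiLetters then c
  else bangShift (if c ∈ asciiLower then 97 else 65) shift c

theorem foldl_snoc (f : Char → Char) :
    ∀ (l : List Char) (acc : List Char),
      l.foldl (fun r c => r ++ [f c]) acc = acc ++ l.map f := by
  intro l
  induction l with
  | nil => intro acc; simp
  | cons x t ih => intro acc; simp [List.foldl_cons, ih]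

theorem bangA_foldl_eq (shift : Int) (l : List Char) :
    l.foldl (fun rev char =>
      if char ∉ asciiLetters then rev ++ [char]
      else
        let start : Int := if char ∈ asciiLower then 97 else 65
        rev ++ [bangShift start shift char]) [] = l.map (gA shift) := by
  have h : (fun (rev : List Char) (char : Char) =>
      if char ∉ asciiLetters then rev ++ [char]
      else
        let start : Int := if char ∈ asciiLower then 97 else 65
        rev ++ [bangShift start shift char]) = fun r c => r ++ [gA shift c] := by
    funext r c
    by_cases h : c ∈ asciiLetters <;> simp [gA, h]
  rw [h, foldl_snoc]
  simp

-- arithmetic characterisation of the alphabet lists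
theorem asciiLower_eq_range : asciiLower = (List.range 26).map (fun i => Char.ofNat (97 + i)) := by decide
theorem asciiUpper_eq_range : asciiUpper = (List.range 26).map (fun i => Char.ofNat (65 + i)) := by decide

theorem toNat_ofNat_valid (n : Nat) (h : n < 55296) : (Char.ofNat n).toNat = n := by
  rw [Char.toNat_ofNat]
  rw [if_pos (Or.inl h)]

theorem mem_range_char (base : Nat) (hbase : base + 26 < 55296) (c : Char) :
    (c ∈ (List.range 26).map (fun i => Char.ofNat (base + i))) ↔ (base ≤ c.toNat ∧ c.toNat ≤ base + 25) := by
  constructor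
  · intro h
    rcases List.mem_map.mp h with ⟨i, hi, hc⟩
    have hi' : i < 26 := List.mem_range.mp hi
    have : c.toNat = base + i := by rw [← hc, toNat_ofNat_valid _ (by omega)]
    omega
  · rintro ⟨h1, h2⟩
    refine List.mem_map.mpr ⟨c.toNat - base, List.mem_range.mpr (by omega), ?_⟩
    have : base + (c.toNat - base) = c.toNat := by omega
    rw [this, Char.ofNat_toNat]

theorem mem_lower_iff (c : Char) : c ∈ asciiLower ↔ (97 ≤ c.toNat ∧ c.toNat ≤ 122) := by
  rw [asciiLower_eq_range, mem_range_char 97 (by norm_num)]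
theorem mem_upper_iff (c : Char) : c ∈ asciiUpper ↔ (65 ≤ c.toNat ∧ c.toNat ≤ 90) := by
  rw [asciiUpper_eq_range, mem_range_char 65 (by norm_num)]

theorem islower_iff (c : Char) : PySem.Chars.islower c = true ↔ 97 ≤ c.toNat ∧ c.toNat ≤ 122 := by
  simp only [PySem.Chars.islower, Bool.and_eq_true, decide_eq_true_eq, Char.le_def,
    UInt32.le_iff_toNat_le]
  exact ⟨fun ⟨h1, h2⟩ => ⟨h1, h2⟩, fun ⟨h1, h2⟩ => ⟨h1, h2⟩⟩

theorem isupper_iff (c : Char) : PySem.Chars.isupper c = true ↔ 65 ≤ c.toNat ∧ c.toNat ≤ 90 := by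
  simp only [PySem.Chars.isupper, Bool.and_eq_true, decide_eq_true_eq, Char.le_def,
    UInt32.le_iff_toNat_le]
  exact ⟨fun ⟨h1, h2⟩ => ⟨h1, h2⟩, fun ⟨h1, h2⟩ => ⟨h1, h2⟩⟩

theorem fmod26_range (a : Int) : 0 ≤ a.fmod 26 ∧ a.fmod 26 < 26 := by
  rw [Int.fmod_eq_emod]
  constructor
  · simp; exact Int.emod_nonneg a (by norm_num)
  · simp; exact Int.emod_lt_of_pos a (by norm_num)

-- fusion of A's per-char decode with the swapcase pass
theorem swap_gA (shift : Int) (c : Char) : swapChar (gA shift c) = bangDecSwap shift c := by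
  by_cases hl : 97 ≤ c.toNat ∧ c.toNat ≤ 122
  · have hml : c ∈ asciiLower := (mem_lower_iff c).mpr hl
    have hmem : c ∈ asciiLetters := by simp [asciiLetters, hml]
    have hg : gA shift c = bangShift 97 shift c := by simp [gA, hmem, hml]
    rw [hg]
    simp only [bangShift, bangDecSwap, PySem.Int.mod]
    rw [if_pos (by omega)]
    set x := ((c.toNat : Int) - 97 - shift) with hx
    obtain ⟨hm0, hm26⟩ := fmod26_range x
    have ht : (Char.ofNat ((x.fmod 26 + 97).toNat)).toNat = (x.fmod 26 + 97).toNat :=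
      toNat_ofNat_valid _ (by omega)
    have hlo : PySem.Chars.islower (Char.ofNat ((x.fmod 26 + 97).toNat)) = true :=
      (islower_iff _).mpr (by omega)
    simp only [swapChar, hlo, if_true, PySem.Chars.upperChar, ht]
    congr 1
    omega
  · by_cases hu : 65 ≤ c.toNat ∧ c.toNat ≤ 90
    · have hmu : c ∈ asciiUpper := (mem_upper_iff c).mpr hu
      have hml : c ∉ asciiLower := fun hc => hl ((mem_lower_iff c).mp hc)
      have hmem : c ∈ asciiLetters := by simp [asciiLetters, hmu]
      have hg : gA shift c = bangShift 65 shift c := by simp [gA, hmem, hml]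
      rw [hg]
      simp only [bangShift, bangDecSwap, PySem.Int.mod]
      rw [if_neg (by omega)]
      rw [if_pos (by omega)]
      set x := ((c.toNat : Int) - 65 - shift) with hx
      obtain ⟨hm0, hm26⟩ := fmod26_range x
      have ht : (Char.ofNat ((x.fmod 26 + 65).toNat)).toNat = (x.fmod 26 + 65).toNat :=
        toNat_ofNat_valid _ (by omega)
      have hnl : PySem.Chars.islower (Char.ofNat ((x.fmod 26 + 65).toNat)) = false := by
        rw [← Bool.not_eq_true]; intro hc
        have := (islower_iff _).mp hc
        omega
      have hup : PySem.Chars.isupper (Char.ofNat ((x.fmod 26 + 65).toNat)) = true :=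
        (isupper_iff _).mpr (by omega)
      simp only [swapChar, hnl, Bool.false_eq_true, if_false, hup, if_true,
        PySem.Chars.lowerChar, ht]
      congr 1
      omega
    · have hml : c ∉ asciiLower := fun hc => hl ((mem_lower_iff c).mp hc)
      have hmu : c ∉ asciiUpper := fun hc => hu ((mem_upper_iff c).mp hc)
      have hmem : c ∉ asciiLetters := by simp [asciiLetters, hml, hmu]
      have hg : gA shift c = c := by simp [gA, hmem]
      rw [hg]
      have hnl : PySem.Chars.islower c = false := by
        rw [← Bool.not_eq_true]; intro hc; exact hl ((islower_iff _).mp hc)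
      have hnu : PySem.Chars.isupper c = false := by
        rw [← Bool.not_eq_true]; intro hc; exact hu ((isupper_iff _).mp hc)
      simp only [swapChar, hnl, Bool.false_eq_true, if_false, hnu, bangDecSwap]
      rw [if_neg (by omega)]
      rw [if_neg (by omega)]

-- A's decode of the rotated-out first char equals B's case-keeping decode
theorem gA_eq_decLast (shift : Int) (c : Char) : gA shift c = bangDecLast shift c := by
  by_cases hl : 97 ≤ c.toNat ∧ c.toNat ≤ 122
  · have hml : c ∈ asciiLower := (mem_lower_iff c).mpr hl
    have hmem : c ∈ asciiLetters := by simp [asciiLetters, hml]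
    have hg : gA shift c = bangShift 97 shift c := by simp [gA, hmem, hml]
    rw [hg]
    simp only [bangShift, bangDecLast, PySem.Int.mod]
    rw [if_pos (by omega)]
  · by_cases hu : 65 ≤ c.toNat ∧ c.toNat ≤ 90
    · have hmu : c ∈ asciiUpper := (mem_upper_iff c).mpr hu
      have hml : c ∉ asciiLower := fun hc => hl ((mem_lower_iff c).mp hc)
      have hmem : c ∈ asciiLetters := by simp [asciiLetters, hmu]
      have hg : gA shift c = bangShift 65 shift c := by simp [gA, hmem, hml]
      rw [hg]
      simp only [bangShift, bangDecLast, PySem.Int.mod]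
      rw [if_neg (by omega)]
      rw [if_pos (by omega)]
    · have hml : c ∉ asciiLower := fun hc => hl ((mem_lower_iff c).mp hc)
      have hmu : c ∉ asciiUpper := fun hc => hu ((mem_upper_iff c).mp hc)
      have hmem : c ∉ asciiLetters := by simp [asciiLetters, hml, hmu]
      have hg : gA shift c = c := by simp [gA, hmem]
      rw [hg]
      simp only [bangDecLast]
      rw [if_neg (by omega)]
      rw [if_neg (by omega)]

theorem bang_eq_alt (data : String) (shift : Int) (h : data ≠ "") :
    bang data shift = bang_alt data shift := by
  unfold bang bang_alt
  rcases hl : data.toList with _ | ⟨c0, rest⟩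
  · exact absurd (String.toList_eq_nil_iff.mp hl) h
  · simp only [bangA_foldl_eq, List.map_cons, PySem.List.pyGet?, PySem.List.pyIdx?,
      PySem.List.slice_from_one, List.length_cons, List.tail_cons]
    have h1 : (List.map (gA shift) rest).map swapChar = rest.map (bangDecSwap shift) := by
      rw [List.map_map]
      exact List.map_congr_left (fun c _ => swap_gA shift c)
    rw [h1, gA_eq_decLast]
    simp

-- ===== VERDICT =====
theorem bang_spec : Claim_equal_bang := by
  intro data shift _ hpre
  unfold Spec_bang
  exact bang_eq_alt data shift hpre
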